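-- pv_equiv track=rewrite | github.com/rickyurvinaunab/INTRO_11285 | clases/listas_de_listas/p9_dcccumpleanosB.py | obtener_confirmados
-- ===== SOURCE A (Python) =====
-- def obtener_confirmados(respuestas):
--     asistentes = []
--     # Se inicializa una lista vacia para guardar los nombres de los invitados confirmados
--
--     for respuesta in respuestas:
--         # Se recorre cada respuesta de la lista
--         nombre = respuesta[0]
--         # Se extrae el nombre del invitado desde la respuesta actual
--         if nombre not in asistentes:
--             # Si el nombre todavia no ha sido agregado a la lista de asistentes...
--             ultima_resp = ""
--             # Se inicializa una variable para guardar la ultima respuesta encontrada para ese nombre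
--             for confirmacion in respuestas:
--                 # Se recorre nuevamente la lista completa de respuestas
--                 if nombre == confirmacion[0]:
--                     # Si el nombre coincide con el de la confirmacion actual...
--                     ultima_resp = confirmacion[1]
--                     # se actualiza la ultima respuesta
--             if ultima_resp == "si":
--                 # Si la ultima respuesta encontrada es "si"...
--                 asistentes.append(nombre)
--                 # se agrega el nombre a la lista de asistentes
--     return asistentes
-- ===== SOURCE B (Python) =====
-- def obtener_confirmados(respuestas):
--     # One pass builds the last response per name; a second order-preserving
--     # pass over first occurrences keeps those whose last response is "si".
--     ultima = {}
--     for r in respuestas: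
--         ultima[r[0]] = r[1]
--     vistos = set()
--     confirmados = []
--     for r in respuestas:
--         n = r[0]
--         if n not in vistos:
--             vistos.add(n)
--             if ultima[n] == "si":
--                 confirmados.append(n)
--     return confirmados
-- ===== Notes on version B (the rewrite author's own statement) =====
-- stated objective: alternative
-- what changed: Replaced the per-new-name rescan of the whole list by one pass that records the last response per name in a dict, then an order-preserving scan over first occurrences.
import Mathlib
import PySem

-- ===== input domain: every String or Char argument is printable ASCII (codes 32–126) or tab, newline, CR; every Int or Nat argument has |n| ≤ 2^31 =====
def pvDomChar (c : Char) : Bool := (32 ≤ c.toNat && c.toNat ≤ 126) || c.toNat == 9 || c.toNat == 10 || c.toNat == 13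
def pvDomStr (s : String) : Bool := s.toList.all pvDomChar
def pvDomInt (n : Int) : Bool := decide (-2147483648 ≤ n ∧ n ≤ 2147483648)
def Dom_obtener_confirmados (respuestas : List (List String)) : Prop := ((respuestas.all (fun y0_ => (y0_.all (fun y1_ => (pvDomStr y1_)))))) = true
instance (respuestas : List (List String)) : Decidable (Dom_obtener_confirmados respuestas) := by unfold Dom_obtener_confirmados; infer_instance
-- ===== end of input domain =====

-- B replaces A's rescan of the whole list per new name by a one-pass last-response
-- dict plus an order-preserving scan over first occurrences (objective: alternative).

-- ===== PORT A =====
def obtener_confirmados (respuestas : List (List String)) : List String :=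
  respuestas.foldl (fun asistentes respuesta =>
    let nombre := PySem.List.pyGetD respuesta 0 ""
    if !(asistentes.contains nombre) then
      let ultima_resp := respuestas.foldl (fun u confirmacion =>
        if nombre == PySem.List.pyGetD confirmacion 0 "" then PySem.List.pyGetD confirmacion 1 ""
        else u) ""
      if ultima_resp == "si" then asistentes ++ [nombre] else asistentes
    else asistentes) []

-- ===== PORT B =====
def obtener_confirmados_alt (respuestas : List (List String)) : List String :=
  let ultima : PySem.Dict String String :=
    respuestas.foldl (fun d r =>
      d.insert (PySem.List.pyGetD r 0 "") (PySem.List.pyGetD r 1 "")) PySem.Dict.empty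
  (respuestas.foldl (fun (st : PySem.Set String × List String) r =>
      let n := PySem.List.pyGetD r 0 ""
      if PySem.Set.contains st.1 n then st
      else (PySem.Set.add st.1 n,
            if ultima.getD n "" == "si" then st.2 ++ [n] else st.2))
    (PySem.Set.empty, [])).2

-- ===== PRECONDITION & SPEC =====
-- Pre_ excludes exactly the inputs on which both Pythons raise IndexError: any row
-- shorter than 2 entries makes A's inner rescan (and B's dict build) index out of range.
def Pre_obtener_confirmados (respuestas : List (List String)) : Prop :=
  ∀ r ∈ respuestas, 2 ≤ r.length
instance (respuestas : List (List String)) : Decidable (Pre_obtener_confirmados respuestas) := by unfold Pre_obtener_confirmados; infer_instance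

def pvWitness_obtener_confirmados : List (List String) :=
  [["ana", "no"], ["bob", "si"], ["ana", "si"]]

def Spec_obtener_confirmados (respuestas : List (List String)) (out : List String) : Prop := out = obtener_confirmados_alt respuestas
instance (respuestas : List (List String)) (out : List String) : Decidable (Spec_obtener_confirmados respuestas out) := by unfold Spec_obtener_confirmados; infer_instance

-- ===== CLAIM (what is proved, stated in full; the proofs are below) =====
def Claim_equal_obtener_confirmados : Prop := ∀ (respuestas : List (List String)), Dom_obtener_confirmados respuestas → Pre_obtener_confirmados respuestas → Spec_obtener_confirmados respuestas (obtener_confirmados respuestas)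

-- ===== LEMMAS AND PROOFS =====

-- the value A's inner rescan computes for a name n: the last response recorded for n
def pvLast (full : List (List String)) (n : String) : String :=
  full.foldl (fun u confirmacion =>
    if n == PySem.List.pyGetD confirmacion 0 "" then PySem.List.pyGetD confirmacion 1 ""
    else u) ""

-- B's dict lookup computes the same last response
lemma pvDict_getD (n : String) :
    ∀ (rs : List (List String)) (d : PySem.Dict String String),
      (rs.foldl (fun d r =>
        d.insert (PySem.List.pyGetD r 0 "") (PySem.List.pyGetD r 1 "")) d).getD n ""
      = rs.foldl (fun u c =>
          if n == PySem.List.pyGetD c 0 "" then PySem.List.pyGetD c 1 "" else u) (d.getD n "") := by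
  intro rs
  induction rs with
  | nil => intro d; rfl
  | cons r rs ih =>
    intro d
    simp only [List.foldl_cons, ih, PySem.Dict.getD_insert]
    by_cases h : n = PySem.List.pyGetD r 0 "" <;> simp [h]

-- main loop invariant: A's accumulator is B's result list, and membership in it is
-- "seen and last response is si"
lemma pvLoop_eq (full : List (List String)) :
    ∀ (pre : List (List String)) (ast seen : List String),
      (∀ m : String, m ∈ ast ↔ m ∈ seen ∧ pvLast full m = "si") →
      pre.foldl (fun asistentes respuesta =>
        let nombre := PySem.List.pyGetD respuesta 0 ""
        if !(asistentes.contains nombre) then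
          if pvLast full nombre == "si" then asistentes ++ [nombre] else asistentes
        else asistentes) ast
      = (pre.foldl (fun (st : PySem.Set String × List String) r =>
          let n := PySem.List.pyGetD r 0 ""
          if PySem.Set.contains st.1 n then st
          else (PySem.Set.add st.1 n,
                if pvLast full n == "si" then st.2 ++ [n] else st.2)) (seen, ast)).2 := by
  intro pre
  induction pre with
  | nil => intro ast seen _; rfl
  | cons r pre ih =>
    intro ast seen hinv
    simp only [List.foldl_cons]
    by_cases hA : (PySem.List.pyGetD r 0 "") ∈ ast
    · obtain ⟨hS, hL⟩ := (hinv _).mp hA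
      have h1 : ast.contains (PySem.List.pyGetD r 0 "") = true := List.contains_iff_mem.mpr hA
      have h2 : PySem.Set.contains seen (PySem.List.pyGetD r 0 "") = true := List.contains_iff_mem.mpr hS
      simp only [h1, h2, Bool.not_true, if_neg, if_pos, Bool.false_eq_true, not_false_eq_true]
      exact ih ast seen hinv
    · have h1 : ast.contains (PySem.List.pyGetD r 0 "") = false := by
        simpa [List.contains_iff_mem] using hA
      by_cases hL : pvLast full (PySem.List.pyGetD r 0 "") = "si"
      · have hS : (PySem.List.pyGetD r 0 "") ∉ seen := fun h => hA ((hinv _).mpr ⟨h, hL⟩)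
        have h2 : PySem.Set.contains seen (PySem.List.pyGetD r 0 "") = false := by
          simpa [List.contains_iff_mem] using hS
        have hadd : PySem.Set.add seen (PySem.List.pyGetD r 0 "") = seen ++ [PySem.List.pyGetD r 0 ""] := by
          simp [PySem.Set.add, PySem.Set.contains] at h2 ⊢
          simp [h2]
        simp only [h1, h2, hL, Bool.not_false, ite_true, ite_false, Bool.false_eq_true, beq_self_eq_true]
        rw [hadd]
        apply ih
        intro m
        constructor
        · intro hm
          rcases List.mem_append.mp hm with hm | hm
          · obtain ⟨h3, h4⟩ := (hinv m).mp hm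
            exact ⟨List.mem_append.mpr (Or.inl h3), h4⟩
          · simp at hm
            subst hm
            exact ⟨List.mem_append.mpr (Or.inr (by simp)), hL⟩
        · rintro ⟨h3, h4⟩
          rcases List.mem_append.mp h3 with h3 | h3
          · exact List.mem_append.mpr (Or.inl ((hinv m).mpr ⟨h3, h4⟩))
          · simp at h3
            subst h3
            exact List.mem_append.mpr (Or.inr (by simp))
      · have hL' : (pvLast full (PySem.List.pyGetD r 0 "") == "si") = false := by
          simpa using hL
        by_cases hS : (PySem.List.pyGetD r 0 "") ∈ seen
        · have h2 : PySem.Set.contains seen (PySem.List.pyGetD r 0 "") = true := List.contains_iff_mem.mpr hS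
          simp only [h1, h2, hL', Bool.not_false, ite_true, ite_false, Bool.false_eq_true]
          exact ih ast seen hinv
        · have h2 : PySem.Set.contains seen (PySem.List.pyGetD r 0 "") = false := by
            simpa [List.contains_iff_mem] using hS
          have hadd : PySem.Set.add seen (PySem.List.pyGetD r 0 "") = seen ++ [PySem.List.pyGetD r 0 ""] := by
            simp [PySem.Set.add, PySem.Set.contains] at h2 ⊢
            simp [h2]
          simp only [h1, h2, hL', Bool.not_false, ite_true, ite_false, Bool.false_eq_true]
          rw [hadd]
          apply ih
          intro m
          rw [hinv m]
          constructor
          · rintro ⟨h3, h4⟩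
            exact ⟨List.mem_append.mpr (Or.inl h3), h4⟩
          · rintro ⟨h3, h4⟩
            rcases List.mem_append.mp h3 with h3 | h3
            · exact ⟨h3, h4⟩
            · simp at h3
              subst h3
              exact absurd h4 hL
          
theorem obtener_confirmados_spec : Claim_equal_obtener_confirmados := by
  unfold Claim_equal_obtener_confirmados
  intro respuestas _ _
  unfold Spec_obtener_confirmados obtener_confirmados obtener_confirmados_alt
  have hU : ∀ m : String,
      (respuestas.foldl (fun d r =>
        d.insert (PySem.List.pyGetD r 0 "") (PySem.List.pyGetD r 1 "")) PySem.Dict.empty).getD m ""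
      = pvLast respuestas m := by
    intro m
    rw [pvDict_getD m respuestas PySem.Dict.empty]
    rfl
  simp only [hU]
  exact pvLoop_eq respuestas respuestas [] [] (by simp)
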